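-- pv_equiv track=rewrite | github.com/hodaoty/CapstoneProject | model_official/src/utils_clean.py | longest_special_run
-- ===== SOURCE A (Python) =====
-- def longest_special_run(s: str) -> int:
--     """Độ dài chuỗi liên tiếp ký tự đặc biệt dài nhất."""
--     if not s:
--         return 0
--     max_run = 0
--     cur = 0
--     for ch in s:
--         if not ch.isalnum() and not ch.isspace():
--             cur += 1
--             max_run = max(max_run, cur)
--         else:
--             cur = 0
--     return max_run
-- ===== SOURCE B (Python) =====
-- def longest_special_run(s: str) -> int:
--     best = 0
--     i = 0
--     n = len(s)
--     while i < n: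
--         if not s[i].isalnum() and not s[i].isspace():
--             j = i
--             while j < n and not s[j].isalnum() and not s[j].isspace():
--                 j += 1
--             if j - i > best:
--                 best = j - i
--             i = j
--         else:
--             i += 1
--     return best
-- ===== Notes on version B (the rewrite author's own statement) =====
-- stated objective: alternative
-- what changed: A keeps a per-character running-counter state machine; B scans run by run with a two-level index loop: when it hits a special character it consumes the whole maximal special run with an inner loop and compares its length to the best once per run.
import Mathlib
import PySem

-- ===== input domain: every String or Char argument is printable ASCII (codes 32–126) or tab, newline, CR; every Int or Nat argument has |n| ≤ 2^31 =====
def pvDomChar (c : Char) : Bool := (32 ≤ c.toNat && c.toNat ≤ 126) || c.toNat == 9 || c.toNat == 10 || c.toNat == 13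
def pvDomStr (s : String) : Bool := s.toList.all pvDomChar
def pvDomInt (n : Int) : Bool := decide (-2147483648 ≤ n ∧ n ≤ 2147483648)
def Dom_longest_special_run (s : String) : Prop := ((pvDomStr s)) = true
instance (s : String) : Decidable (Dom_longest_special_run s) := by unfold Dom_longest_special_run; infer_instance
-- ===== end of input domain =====

-- B replaces A's per-character running-counter state machine by a run-by-run scan
-- (an inner loop consumes each maximal special run); objective: alternative, same cost.

-- ===== PORT A =====
-- special = not ch.isalnum() and not ch.isspace()
def pvSpecial (c : Char) : Bool := !(PySem.Chars.isalnum c) && !(PySem.Chars.isspace c)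

def longest_special_run (s : String) : Int :=
  if s.isEmpty then 0
  else
    (s.toList.foldl
      (fun (st : Int × Int) ch =>
        if pvSpecial ch then (max st.1 (st.2 + 1), st.2 + 1) else (st.1, 0))
      (0, 0)).1

-- ===== PORT B =====
-- inner while loop: length of the leading special run and the remaining suffix
def pvSpanRun : List Char → Int × List Char
  | [] => (0, [])
  | c :: rest =>
    if pvSpecial c then
      let p := pvSpanRun rest
      (p.1 + 1, p.2)
    else (0, c :: rest)

theorem pvSpanRun_length : ∀ l : List Char, (pvSpanRun l).2.length ≤ l.length := by
  intro l
  induction l with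
  | nil => simp [pvSpanRun]
  | cons c rest ih =>
    simp only [pvSpanRun]
    split
    · exact Nat.le_succ_of_le ih
    · simp

-- outer while loop
def pvLoopB (best : Int) : List Char → Int
  | [] => best
  | c :: rest =>
    if pvSpecial c then
      let p := pvSpanRun rest
      pvLoopB (if p.1 + 1 > best then p.1 + 1 else best) p.2
    else pvLoopB best rest
termination_by l => l.length
decreasing_by
  · exact Nat.lt_succ_of_le (pvSpanRun_length rest)
  · simp

def longest_special_run_alt (s : String) : Int := pvLoopB 0 s.toList

-- ===== PRECONDITION & SPEC =====
def Spec_longest_special_run (s : String) (out : Int) : Prop := out = longest_special_run_alt s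
instance (s : String) (out : Int) : Decidable (Spec_longest_special_run s out) := by unfold Spec_longest_special_run; infer_instance

-- ===== CLAIM (what is proved, stated in full; the proofs are below) =====
def Claim_equal_longest_special_run : Prop := ∀ (s : String), Dom_longest_special_run s → Spec_longest_special_run s (longest_special_run s)

-- ===== LEMMAS AND PROOFS =====
-- reference function: longest special run given current run length c
def pvR (c : Int) : List Char → Int
  | [] => c
  | x :: xs => if pvSpecial x then pvR (c + 1) xs else max c (pvR 0 xs)

theorem pvR_ge : ∀ (l : List Char) (c : Int), c ≤ pvR c l := by
  intro l
  induction l with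
  | nil => intro c; simp [pvR]
  | cons x xs ih =>
    intro c
    simp only [pvR]
    split
    · exact le_trans (by omega) (ih (c + 1))
    · exact le_max_left _ _

theorem pvSpanRun_nonneg : ∀ l : List Char, 0 ≤ (pvSpanRun l).1 := by
  intro l
  induction l with
  | nil => simp [pvSpanRun]
  | cons c rest ih =>
    simp only [pvSpanRun]
    split
    · simp only []; omega
    · simp

theorem pvR_span : ∀ (l : List Char) (c : Int), 0 ≤ c →
    pvR c l = max (c + (pvSpanRun l).1) (pvR 0 (pvSpanRun l).2) := by
  intro l
  induction l with
  | nil => intro c hc; simp [pvR, pvSpanRun]; omega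
  | cons x xs ih =>
    intro c hc
    by_cases h : pvSpecial x = true
    · simp only [pvR, pvSpanRun, h, if_true]
      rw [ih (c + 1) (by omega)]
      have := pvSpanRun_nonneg xs
      omega
    · simp only [pvR, pvSpanRun, h, if_false, Bool.false_eq_true]
      have h2 := pvR_ge xs 0
      omega

theorem pvLoopB_eq : ∀ (n : Nat) (l : List Char) (best : Int), l.length ≤ n → 0 ≤ best →
    pvLoopB best l = max best (pvR 0 l) := by
  intro n
  induction n with
  | zero =>
    intro l best hl hb
    have : l = [] := List.eq_nil_of_length_eq_zero (Nat.le_zero.mp hl)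
    subst this
    simp [pvLoopB, pvR]; omega
  | succ n ih =>
    intro l best hl hb
    cases l with
    | nil => simp [pvLoopB, pvR]; omega
    | cons x xs =>
      by_cases h : pvSpecial x = true
      · simp only [pvLoopB, h, if_true]
        have hlen : (pvSpanRun xs).2.length ≤ n :=
          le_trans (pvSpanRun_length xs) (by simpa using Nat.succ_le_succ_iff.mp hl)
        have hpos := pvSpanRun_nonneg xs
        rw [ih _ _ hlen (by omega)]
        have hR : pvR 0 (x :: xs) = pvR 1 xs := by simp [pvR, h]
        rw [hR, pvR_span xs 1 (by omega)]
        omega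
      · simp only [pvLoopB, h, if_false, Bool.false_eq_true]
        rw [ih _ _ (by simpa using Nat.succ_le_succ_iff.mp hl) hb]
        have hR : pvR 0 (x :: xs) = max 0 (pvR 0 xs) := by simp [pvR, h]
        have := pvR_ge xs 0
        rw [hR]
        omega

theorem pvFoldA_eq : ∀ (l : List Char) (m c : Int), 0 ≤ c → c ≤ m →
    (l.foldl
      (fun (st : Int × Int) ch =>
        if pvSpecial ch then (max st.1 (st.2 + 1), st.2 + 1) else (st.1, 0))
      (m, c)).1 = max m (pvR c l) := by
  intro l
  induction l with
  | nil => intro m c hc hcm; simp [pvR]; omega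
  | cons x xs ih =>
    intro m c hc hcm
    by_cases h : pvSpecial x = true
    · simp only [List.foldl_cons, h, if_true]
      rw [ih (max m (c + 1)) (c + 1) (by omega) (by omega)]
      simp only [pvR, h, if_true]
      have := pvR_ge xs (c + 1)
      omega
    · simp only [List.foldl_cons, h, if_false, Bool.false_eq_true]
      rw [ih m 0 (by omega) (by omega)]
      simp only [pvR, h, if_false, Bool.false_eq_true]
      omega

theorem both_eq (s : String) : longest_special_run s = longest_special_run_alt s := by
  unfold longest_special_run longest_special_run_alt
  by_cases h : s.isEmpty = true
  · have : s = "" := String.isEmpty_iff.mp h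
    subst this
    simp [pvLoopB]
  · simp only [h, if_false, Bool.false_eq_true]
    rw [pvFoldA_eq s.toList 0 0 le_rfl le_rfl,
        pvLoopB_eq s.toList.length s.toList 0 le_rfl le_rfl]

-- ===== VERDICT (by name: the statement is the Claim_ definition above) =====
theorem longest_special_run_spec : Claim_equal_longest_special_run := by
  intro s _
  exact both_eq s
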